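-- pv_equiv track=rewrite | github.com/ini/euler | solve.py | problem_40
-- ===== SOURCE A (Python) =====
-- from math import ceil, comb, factorial, floor, gcd, isqrt, lcm, log, prod, sqrt
--
-- def problem_40(idx=(10**i for i in range(7))):
--     """
--     Find the product of the digits at the specified indices
--     in Champernowne's constant.
--     """
--     idx, digits = sorted(idx), []
--     n, current_index = 1, 0
--     while idx:
--         # Find the n-digit number containing the next desired index
--         num, i = divmod(idx[0] - current_index - 1, n)
--         num += 10**(n - 1)
--         if num < 10**n:
--             # Store the i-th digit of this number
--             digits.append(int(str(num)[i]))
--             idx.pop(0)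
--         else:
--             # Update the current Champernowne index (i.e. append all n-digit numbers)
--             current_index += 9 * 10**(n - 1) * n
--             n += 1
--
--     return prod(digits)
-- ===== SOURCE B (Python) =====
-- from math import prod
--
--
-- def digit_at(pos):
--     """Digit of Champernowne's constant at 1-based position pos, located independently."""
--     n = 1
--     while pos > 9 * n * 10 ** (n - 1):
--         pos -= 9 * n * 10 ** (n - 1)
--         n += 1
--     number = 10 ** (n - 1) + (pos - 1) // n
--     return int(str(number)[(pos - 1) % n])
--
--
-- def problem_40(idx=(10**i for i in range(7))):
--     """
--     Find the product of the digits at the specified indices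
--     in Champernowne's constant.
--     """
--     return prod(digit_at(p) for p in idx)
-- ===== Notes on version B (the rewrite author's own statement) =====
-- stated objective: faster
-- what changed: Replaces A's single sorted sweep with a shared band counter and idx.pop(0) by an independent per-index digit_at(pos) band walk, multiplying the digits in input order with no sorting and no mutation.
import Mathlib
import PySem

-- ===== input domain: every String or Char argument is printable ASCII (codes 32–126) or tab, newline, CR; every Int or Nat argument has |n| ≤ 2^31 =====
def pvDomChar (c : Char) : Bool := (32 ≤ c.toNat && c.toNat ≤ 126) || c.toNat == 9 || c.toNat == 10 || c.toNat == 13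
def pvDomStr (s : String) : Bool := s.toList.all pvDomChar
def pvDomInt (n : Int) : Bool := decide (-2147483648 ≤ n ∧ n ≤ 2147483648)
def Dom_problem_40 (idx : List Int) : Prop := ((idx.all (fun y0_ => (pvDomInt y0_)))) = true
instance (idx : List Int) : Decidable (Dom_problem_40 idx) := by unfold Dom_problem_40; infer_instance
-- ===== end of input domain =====

-- B replaces A's single sorted sweep (shared band counter, idx.pop(0)) by an independent
-- per-index band walk digit_at(pos), multiplying the digits in input order (faster: no sort, no pop(0)).

-- ===== PORT A =====
-- int(str(num)[i]), the digit-extraction step both Pythons share literally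
-- (the IndexError case returns 0; it is unreachable under Pre_problem_40)
def pyDigit (num i : Int) : Int :=
  match PySem.List.pyGet? (PySem.Int.toChars num) i with
  | some c => (PySem.Int.ofChars? [c]).getD 0
  | none => 0

-- math.prod
def pyProd (l : List Int) : Int := l.foldl (· * ·) 1

-- the while-loop of A over (idx, digits, n, current_index)
def loopA (l : List Int) (digits : List Int) (n : Nat) (ci : Int) : List Int :=
  match l with
  | [] => digits
  | h :: t =>
    if PySem.Int.floordiv (h - ci - 1) (n : Int) + 10 ^ (n - 1) < 10 ^ n then
      loopA t (digits ++ [pyDigit (PySem.Int.floordiv (h - ci - 1) (n : Int) + 10 ^ (n - 1))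
                                  (PySem.Int.mod (h - ci - 1) (n : Int))]) n ci
    else
      loopA (h :: t) digits (n + 1) (ci + 9 * 10 ^ (n - 1) * (n : Int))
termination_by (l.length, ((l.headD 0) - ci).toNat, 1 - n)
decreasing_by
  · exact Prod.Lex.left _ _ (by simp)
  · simp only [List.headD_cons]
    apply Prod.Lex.right
    rcases Nat.eq_zero_or_pos n with hn | hn
    · subst hn
      simp only [Nat.cast_zero, mul_zero, add_zero]
      exact Prod.Lex.right _ (by norm_num)
    · apply Prod.Lex.left
      rename_i hcond
      have hp : (1 : Int) ≤ 10 ^ (n - 1) := one_le_pow₀ (by norm_num)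
      have hq : (10 : Int) ^ n - 10 ^ (n - 1) ≤ PySem.Int.floordiv (h - ci - 1) (n : Int) := by omega
      have hmul : ((10 : Int) ^ n - 10 ^ (n - 1)) * (n : Int) ≤ h - ci - 1 :=
        (PySem.Int.le_floordiv_iff_mul_le (by exact_mod_cast hn)).mp hq
      have hpow : (10 : Int) ^ n = 10 ^ (n - 1) * 10 := by
        conv_lhs => rw [show n = (n - 1) + 1 by omega]
        rw [pow_succ]
      have h9 : (9 : Int) ≤ 9 * 10 ^ (n - 1) * (n : Int) := by
        nlinarith [hp, show (1 : Int) ≤ (n : Int) by exact_mod_cast hn]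
      have hle : 9 * 10 ^ (n - 1) * (n : Int) ≤ h - ci - 1 := by nlinarith [hmul]
      set s := 9 * (10 : Int) ^ (n - 1) * (n : Int)
      omega

def problem_40 (idx : List Int) : Int :=
  pyProd (loopA (PySem.List.sorted idx (fun x => x) false) [] 1 0)

-- ===== PORT B =====
-- digit_at's while-loop; B's counter n ≥ 1 is represented as m + 1
def digitAtLoop (pos : Int) (m : Nat) : Int :=
  if pos > 9 * ((m : Int) + 1) * 10 ^ m then
    digitAtLoop (pos - 9 * ((m : Int) + 1) * 10 ^ m) (m + 1)
  else
    pyDigit (10 ^ m + PySem.Int.floordiv (pos - 1) ((m : Int) + 1))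
            (PySem.Int.mod (pos - 1) ((m : Int) + 1))
termination_by pos.toNat
decreasing_by
  have hp : (1 : Int) ≤ 10 ^ m := one_le_pow₀ (by norm_num)
  have h9 : (9 : Int) ≤ 9 * ((m : Int) + 1) * 10 ^ m := by
    nlinarith [hp, Int.natCast_nonneg m]
  set s := 9 * ((m : Int) + 1) * 10 ^ m
  omega

def problem_40_alt (idx : List Int) : Int :=
  pyProd (idx.map (fun p => digitAtLoop p 0))

-- ===== PRECONDITION & SPEC =====
-- A raises ValueError (int('-') on the sign of a negative number) whenever idx contains a
-- negative index; Pre_ excludes exactly those inputs (B's Python raises there as well).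
def Pre_problem_40 (idx : List Int) : Prop := ∀ x ∈ idx, 0 ≤ x
instance (idx : List Int) : Decidable (Pre_problem_40 idx) := by unfold Pre_problem_40; infer_instance
def pvWitness_problem_40 : List Int := [1, 12, 0, 190]

def Spec_problem_40 (idx : List Int) (out : Int) : Prop := out = problem_40_alt idx
instance (idx : List Int) (out : Int) : Decidable (Spec_problem_40 idx out) := by unfold Spec_problem_40; infer_instance

-- ===== CLAIM (what is proved, stated in full; the proofs are below) =====
def Claim_equal_problem_40 : Prop := ∀ (idx : List Int), Dom_problem_40 idx → Pre_problem_40 idx → Spec_problem_40 idx (problem_40 idx)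

-- ===== LEMMAS AND PROOFS =====

-- cumulative digit count of Champernowne's constant: champC m = #digits of 1 .. 10^m - 1
def champC : Nat → Int
  | 0 => 0
  | m + 1 => champC m + 9 * ((m : Int) + 1) * 10 ^ m

theorem champC_succ (m : Nat) : champC (m + 1) = champC m + 9 * ((m : Int) + 1) * 10 ^ m := rfl

theorem champC_le_succ (m : Nat) : champC m ≤ champC (m + 1) := by
  rw [champC_succ]
  have hp : (0 : Int) ≤ 9 * ((m : Int) + 1) * 10 ^ m := by positivity
  omega

theorem champC_mono {j k : Nat} (h : j ≤ k) : champC j ≤ champC k := by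
  induction k, h using Nat.le_induction with
  | base => exact le_rfl
  | succ k hk ih => exact ih.trans (champC_le_succ k)

theorem pyProd_eq_prod (l : List Int) : pyProd l = l.prod := List.prod_eq_foldl.symm

-- A's pop test characterised: num < 10^(m+1) ↔ the residual position lies in band m+1
theorem bandA_iff (a : Int) (m : Nat) :
    PySem.Int.floordiv (a - 1) ((m : Int) + 1) + 10 ^ m < 10 ^ (m + 1) ↔
      a ≤ 9 * ((m : Int) + 1) * 10 ^ m := by
  have hb : (0 : Int) < (m : Int) + 1 := by positivity
  have h1 : PySem.Int.floordiv (a - 1) ((m : Int) + 1) < 9 * 10 ^ m ↔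
      a - 1 < 9 * 10 ^ m * ((m : Int) + 1) := PySem.Int.floordiv_lt_iff_lt_mul hb
  have hpow : (10 : Int) ^ (m + 1) = 10 ^ m * 10 := pow_succ 10 m
  constructor
  · intro H
    have hq : PySem.Int.floordiv (a - 1) ((m : Int) + 1) < 9 * 10 ^ m := by omega
    have := h1.mp hq
    nlinarith [this]
  · intro H
    have h2 : a - 1 < 9 * 10 ^ m * ((m : Int) + 1) := by nlinarith [H]
    have hq := h1.mpr h2
    omega

-- descending B's loop through the first m bands
theorem digitAtLoop_descend (x : Int) (m : Nat) (hgt : ∀ j, j < m → champC (j + 1) < x) :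
    digitAtLoop x 0 = digitAtLoop (x - champC m) m := by
  induction m with
  | zero => simp [champC]
  | succ m ih =>
    rw [ih (fun j hj => hgt j (Nat.lt_succ_of_lt hj))]
    rw [digitAtLoop]
    rw [if_pos (by have := hgt m (Nat.lt_succ_self m); rw [champC_succ] at this; omega)]
    congr 1
    rw [champC_succ]; ring

-- B's digit at a position that A pops in band m+1
theorem digitAt_eq_pyDigit (x : Int) (m : Nat)
    (hgt : ∀ j, j < m → champC (j + 1) < x)
    (hle : x - champC m ≤ 9 * ((m : Int) + 1) * 10 ^ m) :
    digitAtLoop x 0 =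
      pyDigit (PySem.Int.floordiv (x - champC m - 1) ((m : Int) + 1) + 10 ^ m)
              (PySem.Int.mod (x - champC m - 1) ((m : Int) + 1)) := by
  rw [digitAtLoop_descend x m hgt, digitAtLoop, if_neg (by omega)]
  congr 1
  ring

theorem champC_nine : champC 9 = 8888888889 := by norm_num [champC]

-- the invariant form of A's loop against B's per-index digits
theorem loopA_eq (k : Nat) : ∀ (l ds : List Int) (m : Nat),
    9 * l.length + (8 - m) ≤ k →
    l.Pairwise (· ≤ ·) →
    (∀ x ∈ l, 0 ≤ x ∧ x ≤ 2147483648) →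
    (∀ x ∈ l, champC m < x ∨ m = 0) →
    pyProd (loopA l ds (m + 1) (champC m)) =
      pyProd ds * pyProd (l.map (fun p => digitAtLoop p 0)) := by
  induction k with
  | zero =>
    intro l ds m hk hpair hbnd hinv
    match l with
    | [] => simp [loopA, pyProd_eq_prod]
    | h :: t => simp at hk
  | succ k ih =>
    intro l ds m hk hpair hbnd hinv
    match l with
    | [] => simp [loopA, pyProd_eq_prod]
    | h :: t =>
      rw [loopA]
      have hcast : ((m + 1 : Nat) : Int) = (m : Int) + 1 := by push_cast; ring
      simp only [Nat.add_sub_cancel, hcast]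
      by_cases hb : PySem.Int.floordiv (h - champC m - 1) ((m : Int) + 1) + 10 ^ m < 10 ^ (m + 1)
      · rw [if_pos hb]
        have hgt : ∀ j, j < m → champC (j + 1) < h := by
          intro j hj
          rcases hinv h (by simp) with hlt | hm0
          · exact lt_of_le_of_lt (champC_mono (by omega)) hlt
          · omega
        rw [ih t _ m (by simp at hk ⊢; omega) hpair.of_cons
              (fun x hx => hbnd x (by simp [hx])) (fun x hx => hinv x (by simp [hx]))]
        have hd : digitAtLoop h 0 =
            pyDigit (PySem.Int.floordiv (h - champC m - 1) ((m : Int) + 1) + 10 ^ m)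
                    (PySem.Int.mod (h - champC m - 1) ((m : Int) + 1)) :=
          digitAt_eq_pyDigit h m hgt ((bandA_iff (h - champC m) m).mp hb)
        simp only [pyProd_eq_prod, List.prod_append, List.prod_cons, List.prod_nil,
          List.map_cons, hd]
        ring
      · rw [if_neg hb]
        have hh : champC (m + 1) < h := by
          have := (not_iff_not.mpr (bandA_iff (h - champC m) m)).mp hb
          rw [champC_succ]; omega
        have hm : m ≤ 7 := by
          by_contra hm'
          have h9 : champC 9 ≤ champC (m + 1) := champC_mono (by omega)
          have hb2 := (hbnd h (by simp)).2
          rw [champC_nine] at h9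
          omega
        have hfold : champC m + 9 * 10 ^ m * ((m : Int) + 1) = champC (m + 1) := by
          rw [champC_succ]; ring
        rw [hfold]
        exact ih (h :: t) ds (m + 1) (by simp at hk ⊢; omega) hpair
          hbnd
          (fun x hx => by
            rcases List.mem_cons.mp hx with rfl | hxt
            · exact Or.inl hh
            · exact Or.inl (lt_of_lt_of_le hh (List.rel_of_pairwise_cons hpair hxt)))

-- ===== VERDICT (by name: the statement is the Claim_ definition above) =====
theorem problem_40_spec : Claim_equal_problem_40 := by
  intro idx hdom hpre
  unfold Spec_problem_40 problem_40 problem_40_alt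
  unfold Dom_problem_40 at hdom
  have hperm : (PySem.List.sorted idx (fun x => x) false).Perm idx := PySem.List.sorted_perm idx (fun x => x) false
  have hpair : (PySem.List.sorted idx (fun x => x) false).Pairwise (· ≤ ·) :=
    PySem.List.sorted_pairwise idx (fun x => x)
  have hbnd : ∀ x ∈ PySem.List.sorted idx (fun x => x) false, 0 ≤ x ∧ x ≤ 2147483648 := by
    intro x hx
    have hx' : x ∈ idx := hperm.subset hx
    have h2 : pvDomInt x = true := List.all_eq_true.mp hdom x hx'
    simp only [pvDomInt, decide_eq_true_eq] at h2
    exact ⟨hpre x hx', h2.2⟩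
  have hmain := loopA_eq (9 * (PySem.List.sorted idx (fun x => x) false).length + 8)
    (PySem.List.sorted idx (fun x => x) false) [] 0 (by omega) hpair hbnd
    (fun x _ => Or.inr rfl)
  have h0 : champC 0 = 0 := rfl
  rw [h0] at hmain
  rw [hmain]
  simp only [pyProd_eq_prod, List.prod_nil, one_mul]
  exact (hperm.map (fun p => digitAtLoop p 0)).prod_eq
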